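-- pv_equiv track=rewrite | github.com/philletourneau/motusphera-scheduler | simulator.py | process_positions
-- ===== SOURCE A (Python) =====
-- def process_positions(flat_positions, balls_per_ring):
--     frame = []
--     index = 0
--     for num_balls in balls_per_ring:
--         ring_positions = flat_positions[index:index + num_balls]
--         frame.append(ring_positions)
--         index += num_balls
--     return frame
-- ===== SOURCE B (Python) =====
-- def process_positions(flat_positions, balls_per_ring):
--     bounds = [0]
--     for n in balls_per_ring:
--         bounds.append(bounds[-1] + n)
--     return [flat_positions[a:b] for a, b in zip(bounds, bounds[1:])]
-- ===== Notes on version B (the rewrite author's own statement) =====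
-- stated objective: idiomatic
-- what changed: B precomputes the prefix-sum boundary list once and builds the result as a comprehension slicing between consecutive boundaries, instead of a loop maintaining a running index and appending to an accumulator.
import Mathlib
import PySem

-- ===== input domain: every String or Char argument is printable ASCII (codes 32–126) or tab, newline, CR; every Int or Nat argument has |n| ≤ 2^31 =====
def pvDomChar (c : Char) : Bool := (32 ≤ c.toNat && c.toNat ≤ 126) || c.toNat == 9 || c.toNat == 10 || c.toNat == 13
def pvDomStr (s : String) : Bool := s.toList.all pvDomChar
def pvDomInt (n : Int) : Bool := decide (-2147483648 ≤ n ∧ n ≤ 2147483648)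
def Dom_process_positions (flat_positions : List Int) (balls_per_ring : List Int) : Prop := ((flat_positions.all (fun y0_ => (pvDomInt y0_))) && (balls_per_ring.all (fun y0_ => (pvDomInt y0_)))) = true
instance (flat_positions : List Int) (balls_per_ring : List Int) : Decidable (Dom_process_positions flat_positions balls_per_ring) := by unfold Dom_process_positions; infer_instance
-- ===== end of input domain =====

-- B replaces the running-index loop by a precomputed prefix-sum boundary list and a
-- comprehension slicing between consecutive boundaries (same cost, more idiomatic).

-- ===== PORT A =====
-- loop: frame/index accumulator over balls_per_ring; each step slices flat_positions[index:index+n]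
def process_positions (flat_positions : List Int) (balls_per_ring : List Int) : List (List Int) :=
  (balls_per_ring.foldl
    (fun (st : List (List Int) × Int) num_balls =>
      (st.1 ++ [PySem.List.slice flat_positions (some st.2) (some (st.2 + num_balls))],
       st.2 + num_balls))
    ([], 0)).1

-- ===== PORT B =====
-- bounds = [0]; for n: bounds.append(bounds[-1]+n); then slice between consecutive bounds
def process_positions_alt (flat_positions : List Int) (balls_per_ring : List Int) : List (List Int) :=
  let bounds := balls_per_ring.foldl (fun acc n => acc ++ [acc.getLastD 0 + n]) [0]
  (bounds.zip bounds.tail).map (fun p => PySem.List.slice flat_positions (some p.1) (some p.2))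

-- ===== PRECONDITION & SPEC =====
def Spec_process_positions (flat_positions : List Int) (balls_per_ring : List Int) (out : List (List Int)) : Prop := out = process_positions_alt flat_positions balls_per_ring
instance (flat_positions : List Int) (balls_per_ring : List Int) (out : List (List Int)) : Decidable (Spec_process_positions flat_positions balls_per_ring out) := by unfold Spec_process_positions; infer_instance

-- ===== CLAIM (what is proved, stated in full; the proofs are below) =====
def Claim_equal_process_positions : Prop := ∀ (flat_positions : List Int) (balls_per_ring : List Int), Dom_process_positions flat_positions balls_per_ring → Spec_process_positions flat_positions balls_per_ring (process_positions flat_positions balls_per_ring)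

-- ===== LEMMAS AND PROOFS =====

-- reference form: chunks starting at offset i
def ppGo (fp : List Int) (i : Int) : List Int → List (List Int)
  | [] => []
  | n :: l => PySem.List.slice fp (some i) (some (i + n)) :: ppGo fp (i + n) l

-- running partial sums starting from i
def ppSums (i : Int) : List Int → List Int
  | [] => []
  | n :: l => (i + n) :: ppSums (i + n) l

theorem ppA_eq (fp : List Int) (l : List Int) (acc : List (List Int)) (i : Int) :
    (l.foldl (fun (st : List (List Int) × Int) n =>
      (st.1 ++ [PySem.List.slice fp (some st.2) (some (st.2 + n))], st.2 + n)) (acc, i)).1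
    = acc ++ ppGo fp i l := by
  induction l generalizing acc i with
  | nil => simp [ppGo]
  | cons n l ih => simp [List.foldl, ppGo, ih]

theorem ppBounds_eq (l : List Int) (pre : List Int) (i : Int) (h : pre.getLastD 0 = i) :
    l.foldl (fun acc n => acc ++ [acc.getLastD 0 + n]) pre = pre ++ ppSums i l := by
  induction l generalizing pre i with
  | nil => simp [ppSums]
  | cons n l ih =>
    simp only [List.foldl, h, ppSums]
    rw [ih (pre ++ [i + n]) (i + n) (by simp)]
    simp

theorem ppZip_eq (fp : List Int) (l : List Int) (i : Int) :
    ((i :: ppSums i l).zip (ppSums i l)).map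
      (fun p => PySem.List.slice fp (some p.1) (some p.2)) = ppGo fp i l := by
  induction l generalizing i with
  | nil => simp [ppSums, ppGo]
  | cons n l ih =>
    have h := ih (i + n)
    simp only [List.zip] at h
    simp [ppSums, ppGo, List.zip, h]

-- ===== VERDICT (by name: the statement is the Claim_ definition above) =====
theorem process_positions_spec : Claim_equal_process_positions := by
  intro fp bpr _
  show _ = _
  unfold process_positions process_positions_alt
  rw [ppA_eq, ppBounds_eq bpr [0] 0 rfl]
  simp only [List.nil_append, List.singleton_append, List.tail_cons]
  rw [ppZip_eq]
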